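-- pv_equiv track=rewrite | github.com/sajib-mandal/Dynamic_Programming | Memoization and Recursion/sum_possivle.py | sum_possible
-- ===== SOURCE A (Python) =====
-- def sum_possible(amount, numbers):
--     if amount < 0:
--         return False
--     if amount == 0:
--         return True
--     for num in numbers:
--         if sum_possible(amount - num, numbers) == True:
--             return True
--     return False
-- ===== SOURCE B (Python) =====
-- def sum_possible(amount, numbers):
--     # Bottom-up DP over 0..amount instead of A's exponential recursion.
--     if amount < 0:
--         return False
--     reach = [True]
--     for i in range(1, amount + 1):
--         reach.append(any(0 < n <= i and reach[i - n] for n in numbers))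
--     return reach[amount]
-- ===== Notes on version B (the rewrite author's own statement) =====
-- stated objective: alternative
-- what changed: Replaced A's exponential branching recursion with a bottom-up boolean DP table over 0..amount; Pre_ excludes lists containing a nonpositive number (unless amount <= 0), on which A's unbounded recursion raises RecursionError on most inputs and, where it happens to return, the result depends on traversal order that the positive-number DP does not model.
-- outside the precondition, e.g. on sum_possible(1, [3, -2]): A returns True, B returns False; on sum_possible(2, [1, 0]): A returns True, B returns True
import Mathlib
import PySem

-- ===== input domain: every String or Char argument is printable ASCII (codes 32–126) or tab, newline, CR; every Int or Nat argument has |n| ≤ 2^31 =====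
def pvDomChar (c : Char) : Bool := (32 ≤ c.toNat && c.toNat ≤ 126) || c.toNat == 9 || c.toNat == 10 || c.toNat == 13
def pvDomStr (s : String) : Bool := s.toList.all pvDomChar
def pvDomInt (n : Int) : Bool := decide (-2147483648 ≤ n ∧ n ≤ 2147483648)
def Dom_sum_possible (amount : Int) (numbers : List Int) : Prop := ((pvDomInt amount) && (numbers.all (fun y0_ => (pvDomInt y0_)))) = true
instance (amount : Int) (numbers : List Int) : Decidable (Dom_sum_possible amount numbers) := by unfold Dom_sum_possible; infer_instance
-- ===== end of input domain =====

-- B replaces A's exponential recursion by a bottom-up DP table over 0..amount;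
-- equivalence is proved on Pre_ (amount ≤ 0, or all numbers positive), where A terminates.

-- ===== PORT A =====
-- A's recursion does not terminate when a nonpositive number must be explored, so the
-- port carries fuel; on Pre_ inputs the recursion depth is at most amount, so fuel
-- amount.toNat + 1 makes the port exact there.
def sum_possible_fuel (numbers : List Int) : Nat → Int → Bool
  | 0, _ => false
  | f + 1, amount =>
    if amount < 0 then false
    else if amount = 0 then true
    else numbers.any (fun num => sum_possible_fuel numbers f (amount - num))

def sum_possible (amount : Int) (numbers : List Int) : Bool :=
  sum_possible_fuel numbers (amount.toNat + 1) amount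

-- ===== PORT B =====
def sum_possible_alt (amount : Int) (numbers : List Int) : Bool :=
  if amount < 0 then false
  else
    let a := amount.toNat
    let reach := (List.range a).foldl
      (fun (reach : List Bool) (j : Nat) =>
        let i : Int := (j : Int) + 1
        reach ++ [numbers.any (fun n =>
          decide (0 < n) && decide (n ≤ i) && reach.getD (i - n).toNat false)])
      [true]
    reach.getD a false

-- ===== PRECONDITION & SPEC =====
-- Pre_ excludes lists containing a nonpositive number (when amount > 0): there A's
-- unbounded recursion raises RecursionError on most inputs, and where it happens to
-- return, the value is an artefact of traversal order that the positive-number DP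
-- does not model.
def Pre_sum_possible (amount : Int) (numbers : List Int) : Prop :=
  amount ≤ 0 ∨ ∀ n ∈ numbers, 0 < n
instance (amount : Int) (numbers : List Int) : Decidable (Pre_sum_possible amount numbers) := by
  unfold Pre_sum_possible; infer_instance

def pvWitness_sum_possible : Int × List Int := (7, [2, 5])

def Spec_sum_possible (amount : Int) (numbers : List Int) (out : Bool) : Prop := out = sum_possible_alt amount numbers
instance (amount : Int) (numbers : List Int) (out : Bool) : Decidable (Spec_sum_possible amount numbers out) := by unfold Spec_sum_possible; infer_instance

-- ===== CLAIM (what is proved, stated in full; the proofs are below) =====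
def Claim_equal_sum_possible : Prop := ∀ (amount : Int) (numbers : List Int), Dom_sum_possible amount numbers → Pre_sum_possible amount numbers → Spec_sum_possible amount numbers (sum_possible amount numbers)

-- ===== LEMMAS AND PROOFS =====

-- Common reference function: is k reachable as a sum of positive elements of `numbers`?
def chk (numbers : List Int) : Nat → Bool
  | 0 => true
  | k + 1 => numbers.attach.any (fun n =>
      if h : 0 < n.1 ∧ n.1 ≤ (k : Int) + 1 then chk numbers (k + 1 - n.1.toNat) else false)
  decreasing_by omega

theorem chk_zero (numbers : List Int) : chk numbers 0 = true := by rw [chk]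

theorem attach_any_eq (l : List Int) (p : Int → Bool) :
    l.attach.any (fun n => p n.1) = l.any p := by
  simp

theorem chk_succ (numbers : List Int) (k : Nat) :
    chk numbers (k + 1) = numbers.any (fun n =>
      if 0 < n ∧ n ≤ (k : Int) + 1 then chk numbers (k + 1 - n.toNat) else false) := by
  rw [chk]
  simp only [dite_eq_ite]
  exact attach_any_eq numbers (fun n => if 0 < n ∧ n ≤ (k : Int) + 1 then chk numbers (k + 1 - n.toNat) else false)

theorem any_congr_mem {l : List Int} {p q : Int → Bool}
    (h : ∀ a ∈ l, p a = q a) : l.any p = l.any q := by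
  induction l with
  | nil => rfl
  | cons x xs ih =>
    simp only [List.any_cons, h x (by simp), ih (fun a ha => h a (by simp [ha]))]

-- A with sufficient fuel computes chk, for all-positive numbers.
theorem fuel_eq_chk (numbers : List Int) (hpos : ∀ n ∈ numbers, 0 < n) :
    ∀ k f, k < f → sum_possible_fuel numbers f (k : Int) = chk numbers k := by
  intro k
  induction k using Nat.strong_induction_on with
  | _ k ih =>
    intro f hf
    match f, k with
    | f' + 1, 0 => simp [sum_possible_fuel, chk_zero]
    | f' + 1, k' + 1 =>
      rw [sum_possible_fuel]
      have h0 : ¬ ((k' + 1 : Nat) : Int) < 0 := by omega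
      have h1 : ¬ ((k' + 1 : Nat) : Int) = 0 := by omega
      rw [if_neg h0, if_neg h1, chk_succ]
      apply any_congr_mem
      intro n hn
      have hnp : 0 < n := hpos n hn
      by_cases hle : n ≤ (k' : Int) + 1
      · have hcast : ((k' + 1 : Nat) : Int) - n = ((k' + 1 - n.toNat : Nat) : Int) := by omega
        rw [hcast, ih (k' + 1 - n.toNat) (by omega) f' (by omega)]
        rw [if_pos ⟨hnp, hle⟩]
      · have hneg : ((k' + 1 : Nat) : Int) - n < 0 := by omega
        have hfalse : sum_possible_fuel numbers f' (((k' + 1 : Nat) : Int) - n) = false := by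
          match f' with
          | 0 => rfl
          | f'' + 1 => rw [sum_possible_fuel, if_pos hneg]
        rw [hfalse, if_neg (fun hc => hle hc.2)]

-- B's table invariant: after folding range m, reach = [chk 0, …, chk m].
theorem reach_invariant (numbers : List Int) (m : Nat) :
    (List.range m).foldl
      (fun (reach : List Bool) (j : Nat) =>
        let i : Int := (j : Int) + 1
        reach ++ [numbers.any (fun n =>
          decide (0 < n) && decide (n ≤ i) && reach.getD (i - n).toNat false)])
      [true]
    = (List.range (m + 1)).map (chk numbers) := by
  induction m with
  | zero => simp [chk_zero]
  | succ m ih =>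
    rw [List.range_succ, List.foldl_append, ih, List.foldl_cons, List.foldl_nil]
    rw [List.range_succ (n := m + 1), List.map_append]
    refine congrArg (fun x => List.map (chk numbers) (List.range (m + 1)) ++ [x]) ?_
    rw [chk_succ]
    apply any_congr_mem
    intro n _
    by_cases h : 0 < n ∧ n ≤ (m : Int) + 1
    · rw [if_pos h]
      have hidx : (((m : Int) + 1) - n).toNat = m + 1 - n.toNat := by omega
      rw [hidx]
      simp only [h.1, h.2, decide_true, Bool.true_and]
      rw [List.getD_eq_getElem?_getD, List.getElem?_map,
        List.getElem?_range (by omega : m + 1 - n.toNat < m + 1)]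
      rfl
    · rw [if_neg h]
      rcases Decidable.not_and_iff_or_not.mp h with h1 | h1 <;>
        simp [decide_eq_false h1]

-- ===== VERDICT (by name: the statement is the Claim_ definition above) =====
set_option maxRecDepth 4000 in
theorem sum_possible_spec : Claim_equal_sum_possible := by
  intro amount numbers _ hpre
  unfold Spec_sum_possible sum_possible sum_possible_alt
  by_cases hneg : amount < 0
  · rw [if_pos hneg, sum_possible_fuel, if_pos hneg]
  · rw [if_neg hneg]
    obtain ⟨k, rfl⟩ : ∃ k : Nat, amount = (k : Int) := ⟨amount.toNat, by omega⟩
    simp only [Int.toNat_natCast]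
    rw [reach_invariant]
    cases k with
    | zero =>
      have hl : sum_possible_fuel numbers (0 + 1) ((0 : Nat) : Int) = true := by
        rw [sum_possible_fuel]; norm_num
      have hr : (List.map (chk numbers) (List.range (0 + 1))).getD 0 false = true := by
        simp [List.range_succ, chk_zero]
      rw [hl, hr]
    | succ k' =>
      have hpos : ∀ n ∈ numbers, 0 < n := by
        rcases hpre with h | h
        · exfalso; omega
        · exact h
      rw [fuel_eq_chk numbers hpos (k' + 1) (k' + 2) (by omega)]
      rw [List.getD_eq_getElem?_getD, List.getElem?_map,
        List.getElem?_range (by omega : k' + 1 < k' + 1 + 1)]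
      rfl
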